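-- pv_equiv track=rewrite | github.com/yongmin01/Algorithm | Programmers/연속된 부분 수열의 합.py | solution
-- ===== SOURCE A (Python) =====
-- def solution(sequence, k):
--     result = []
--     s = e = 0
--     acc = sequence[s]
--
--     while s < len(sequence) and e < len(sequence) :
--         if acc < k : # acc가 k보다 작을 경우 end 늘리기
--             e += 1
--             if e < len(sequence) : # 인덱스 범위를 넘지 않는지 체크
--                 acc += sequence[e]
--
--         elif acc == k : # acc가 k일경우 result 갱신
--             if len(result) == 0 : result = [s, e]
--             else :
--                 if e - s < result[1] - result[0] :
--                     result = [s, e]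
--                 elif e - s == result[1] - result[0] :
--                     result = [s, e] if s < result[0] else result
--             e += 1 # result 갱신 후 end를 늘려서 acc 갱신
--             if e < len(sequence) :
--                 acc += sequence[e]
--
--         else : # acc가 k보다 큰 경우 start 밀기
--             if s < len(sequence) : acc -= sequence[s] # 인덱스 범위를 넘지 않는지 체크
--             s += 1
--
--     return result
-- ===== SOURCE B (Python) =====
-- def solution(sequence, k):
--     # precomputed prefix sums; for each window end, advance the start past all
--     # prefixes below prefix[e+1]-k, record [s, e] when it hits it exactly
--     n = len(sequence)
--     prefix = [0]
--     for x in sequence: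
--         prefix.append(prefix[-1] + x)
--     best = []
--     s = 0
--     for e in range(n):
--         target = prefix[e + 1] - k
--         while s < n and prefix[s] < target:
--             s += 1
--         if s == n:
--             break
--         if prefix[s] == target and (not best or e - s < best[1] - best[0]):
--             best = [s, e]
--     return best
-- ===== Notes on version B (the rewrite author's own statement) =====
-- stated objective: alternative
-- what changed: Replaces A's incremental-accumulator three-branch sliding-window automaton (single while loop juggling s, e and a running window sum) by a precomputed prefix-sum array scanned once: an outer loop over window ends with an inner loop advancing the start past all prefixes below prefix[e+1]-k, recording [s,e] on an exact hit with a single strict-improvement update (A's tie branch is provably dead); B also returns [] instead of raising IndexError on the empty sequence, which Pre_ excludes.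
import Mathlib
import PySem

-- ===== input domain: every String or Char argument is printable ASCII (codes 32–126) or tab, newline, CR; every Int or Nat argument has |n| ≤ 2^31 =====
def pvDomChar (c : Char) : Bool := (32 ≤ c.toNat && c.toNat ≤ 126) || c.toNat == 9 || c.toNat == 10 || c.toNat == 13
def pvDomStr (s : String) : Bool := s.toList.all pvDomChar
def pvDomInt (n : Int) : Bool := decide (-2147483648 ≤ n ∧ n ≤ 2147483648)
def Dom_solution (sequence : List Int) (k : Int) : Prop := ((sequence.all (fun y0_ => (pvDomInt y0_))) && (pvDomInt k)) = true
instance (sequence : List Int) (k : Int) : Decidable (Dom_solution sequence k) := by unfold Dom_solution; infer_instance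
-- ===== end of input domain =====

-- B replaces A's running-accumulator three-branch sliding-window automaton by a
-- precomputed prefix-sum array scanned with an outer loop over window ends and an
-- inner start-advance (a different decomposition of the same linear scan).

-- ===== PORT A =====
-- A's result-update step (the body of the 'elif acc == k' branch).
-- res is always [] or a two-element list, so the .getD 0 defaults are never hit.
def updA (res : List Int) (s e : Int) : List Int :=
  if res.length = 0 then [s, e]
  else if e - s < (PySem.List.pyGet? res 1).getD 0 - (PySem.List.pyGet? res 0).getD 0 then [s, e]
  else if e - s = (PySem.List.pyGet? res 1).getD 0 - (PySem.List.pyGet? res 0).getD 0 then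
    if s < (PySem.List.pyGet? res 0).getD 0 then [s, e] else res
  else res

-- A's while loop, step for step.
def loopA (seq : List Int) (k s e acc : Int) (res : List Int) : List Int :=
  if _h : s < (seq.length : Int) ∧ e < (seq.length : Int) then
    if acc < k then
      loopA seq k s (e + 1)
        (if e + 1 < (seq.length : Int) then acc + PySem.List.pyGetD seq (e + 1) 0 else acc) res
    else if acc = k then
      loopA seq k s (e + 1)
        (if e + 1 < (seq.length : Int) then acc + PySem.List.pyGetD seq (e + 1) 0 else acc)
        (updA res s e)
    else
      loopA seq k (s + 1) e
        (if s < (seq.length : Int) then acc - PySem.List.pyGetD seq s 0 else acc) res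
  else res
termination_by (2 * (seq.length : Int) - s - e).toNat
decreasing_by all_goals omega

-- 'acc = sequence[s]' raises IndexError on []; that input is outside Pre_.
def solution (sequence : List Int) (k : Int) : List Int :=
  loopA sequence k 0 0 ((PySem.List.pyGet? sequence 0).getD 0) []

-- ===== PORT B =====
-- Source B's 'prefix = [0]; for x in sequence: prefix.append(prefix[-1] + x)'.
def buildPrefix (pre : List Int) : List Int → List Int
  | [] => pre
  | x :: rest => buildPrefix (pre ++ [(PySem.List.pyGet? pre (-1)).getD 0 + x]) rest

-- Source B's inner 'while s < n and prefix[s] < target: s += 1'.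
def advanceS (pre : List Int) (n target s : Int) : Int :=
  if s < n ∧ PySem.List.pyGetD pre s 0 < target then advanceS pre n target (s + 1) else s
termination_by (n - s).toNat
decreasing_by omega

-- Source B's 'for e in range(n)' with its break.
def colLoop (pre : List Int) (k n : Int) (s : Int) (best : List Int) :
    List Int → List Int
  | [] => best
  | e :: es =>
    let target := PySem.List.pyGetD pre (e + 1) 0 - k
    let s' := advanceS pre n target s
    if s' = n then best
    else
      let best' :=
        if PySem.List.pyGetD pre s' 0 = target ∧
            (best = [] ∨ e - s' < (PySem.List.pyGet? best 1).getD 0 - (PySem.List.pyGet? best 0).getD 0) then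
          [s', e]
        else best
      colLoop pre k n s' best' es

def solution_alt (sequence : List Int) (k : Int) : List Int :=
  colLoop (buildPrefix [0] sequence) k (sequence.length : Int) 0 []
    (PySem.List.pyRange 0 (sequence.length : Int) 1)

-- ===== PRECONDITION & SPEC =====
-- Pre_ excludes exactly the empty sequence, on which A raises IndexError
-- ('acc = sequence[0]'); B returns [] there.
def Pre_solution (sequence : List Int) (k : Int) : Prop := sequence ≠ []
instance (sequence : List Int) (k : Int) : Decidable (Pre_solution sequence k) := by
  unfold Pre_solution; infer_instance

def pvWitness_solution : List Int × Int := ([1, 2, 3, 4, 5], 5)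

def Spec_solution (sequence : List Int) (k : Int) (out : List Int) : Prop :=
  out = solution_alt sequence k
instance (sequence : List Int) (k : Int) (out : List Int) : Decidable (Spec_solution sequence k out) := by
  unfold Spec_solution; infer_instance

-- ===== CLAIM (what is proved, stated in full; the proofs are below) =====
def Claim_equal_solution : Prop := ∀ (sequence : List Int) (k : Int),
  Dom_solution sequence k → Pre_solution sequence k →
  Spec_solution sequence k (solution sequence k)

-- ===== LEMMAS AND PROOFS =====

-- prefix sums
def pfx (seq : List Int) (i : Nat) : Int := (seq.take i).sum

-- the fully built prefix list
def preL (seq : List Int) : List Int := (List.range (seq.length + 1)).map (pfx seq)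

lemma pfx_succ (seq : List Int) (i : Nat) (h : i < seq.length) :
    pfx seq (i + 1) = pfx seq i + seq[i] := by
  rw [pfx, pfx, List.take_add_one, List.sum_append, List.getElem?_eq_getElem h]
  simp

lemma buildPrefix_eq (seq : List Int) :
    ∀ (i : Nat), i ≤ seq.length →
      buildPrefix ((List.range (i + 1)).map (pfx seq)) (seq.drop i) = preL seq := by
  intro i
  induction hd : seq.drop i generalizing i with
  | nil =>
    intro hi
    have : seq.length ≤ i := by
      by_contra hc
      rw [List.drop_eq_getElem_cons (by omega)] at hd
      cases hd
    have hin : i = seq.length := by omega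
    rw [buildPrefix, preL, hin]
  | cons x rest ih =>
    intro hi
    have hilt : i < seq.length := by
      by_contra hc
      rw [List.drop_eq_nil_iff.mpr (by omega)] at hd
      cases hd
    rw [List.drop_eq_getElem_cons hilt] at hd
    obtain ⟨hx, hrest⟩ : x = seq[i] ∧ rest = seq.drop (i + 1) := by
      cases hd; exact ⟨rfl, rfl⟩
    rw [buildPrefix]
    have hlast : ((PySem.List.pyGet? ((List.range (i + 1)).map (pfx seq)) (-1)).getD 0) =
        pfx seq i := by
      rw [PySem.List.pyGet?_neg_one]
      rw [List.range_succ, List.map_append]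
      simp
    rw [hlast, hx, ← pfx_succ seq i hilt,
      show (List.range (i + 1)).map (pfx seq) ++ [pfx seq (i + 1)] =
        (List.range (i + 1 + 1)).map (pfx seq) by
          rw [List.range_succ (n := i + 1), List.map_append]
          simp]
    exact ih (i + 1) hrest.symm (by omega)

lemma preGet (seq : List Int) (j : Nat) (hj : j ≤ seq.length) :
    PySem.List.pyGetD (preL seq) (j : Int) 0 = pfx seq j := by
  rw [PySem.List.pyGetD_natCast, preL]
  rw [List.getD_eq_getElem?_getD, List.getElem?_map, List.getElem?_range (by omega)]
  rfl

-- one unfold of the inner while when it keeps running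
lemma advanceS_shift (seq : List Int) (target : Int) (s : Nat)
    (hsn : s < seq.length) (hlt : pfx seq s < target) :
    advanceS (preL seq) (seq.length : Int) target (s : Int) =
      advanceS (preL seq) (seq.length : Int) target ((s : Int) + 1) := by
  rw [advanceS]
  rw [if_pos ⟨by exact_mod_cast hsn, by rw [preGet seq s (by omega)]; exact hlt⟩]

-- one unfold of the inner while when it stops
lemma advanceS_stop (seq : List Int) (target : Int) (s : Nat)
    (h : ¬ (s < seq.length ∧ pfx seq s < target)) :
    advanceS (preL seq) (seq.length : Int) target (s : Int) = (s : Int) := by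
  rw [advanceS, if_neg]
  intro ⟨h1, h2⟩
  refine h ⟨by exact_mod_cast h1, ?_⟩
  rw [preGet seq s (by exact_mod_cast le_of_lt (by exact_mod_cast h1))] at h2
  exact h2

lemma pyGet_pair0 (x y : Int) : (PySem.List.pyGet? [x, y] 0).getD 0 = x := by
  rw [PySem.List.pyGet?_zero]; rfl

lemma pyGet_pair1 (x y : Int) : (PySem.List.pyGet? [x, y] 1).getD 0 = y := by
  rw [show (1 : Int) = ((1 : Nat) : Int) by norm_num,
    PySem.List.pyGet?_ofNat [x, y] 1 (by norm_num)]
  rfl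

-- A's update agrees with B's strict-improvement update on the reachable results:
-- res is [] or a window [s0, e0] with s0 ≤ s (A's start never moves back), so A's
-- tie branch 's < result[0]' never fires.
lemma updA_eq_updB (res : List Int) (s e : Nat)
    (hres : res = [] ∨ ∃ s0 e0 : Nat, res = [(s0 : Int), (e0 : Int)] ∧ s0 ≤ s) :
    updA res (s : Int) (e : Int) =
      (if res = [] ∨ (e : Int) - (s : Int) <
          (PySem.List.pyGet? res 1).getD 0 - (PySem.List.pyGet? res 0).getD 0 then
        [(s : Int), (e : Int)]
      else res) := by
  rcases hres with h | ⟨s0, e0, hb, hs0⟩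
  · subst h; simp [updA]
  · subst hb
    rw [updA, pyGet_pair0, pyGet_pair1,
      if_neg (by simp : ¬ ([(s0 : Int), (e0 : Int)].length = 0))]
    have hnlt : ¬ ((s : Int) < (s0 : Int)) := by exact_mod_cast Nat.not_lt.mpr hs0
    by_cases hlt2 : (e : Int) - (s : Int) < (e0 : Int) - (s0 : Int)
    · rw [if_pos hlt2, if_pos (Or.inr hlt2)]
    · have hor : ¬ (([(s0 : Int), (e0 : Int)] : List Int) = [] ∨
          (e : Int) - (s : Int) < (e0 : Int) - (s0 : Int)) := by
        rintro (h | h)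
        · simp at h
        · exact hlt2 h
      rw [if_neg hlt2, if_neg hor]
      by_cases heq : (e : Int) - (s : Int) = (e0 : Int) - (s0 : Int)
      · rw [if_pos heq, if_neg hnlt]
      · rw [if_neg heq]

-- main synchronisation: A's three-branch walk = B's column scan, from any
-- reachable state (acc is the current window sum, res a window seen earlier)
lemma loopA_eq_col (seq : List Int) (k : Int) :
    ∀ (m s e : Nat) (acc : Int) (res : List Int),
      2 * seq.length - s - e ≤ m → s ≤ seq.length → e ≤ seq.length →
      acc = pfx seq (min (e + 1) seq.length) - pfx seq s →
      (res = [] ∨ ∃ s0 e0 : Nat, res = [(s0 : Int), (e0 : Int)] ∧ s0 ≤ s) →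
      loopA seq k (s : Int) (e : Int) acc res =
        colLoop (preL seq) k (seq.length : Int) (s : Int) res
          (PySem.List.pyRange (e : Int) (seq.length : Int) 1) := by
  intro m
  induction m using Nat.strong_induction_on with
  | _ m ih =>
    intro s e acc res hm hs he hacc hres
    rw [loopA]
    by_cases hcond : (s : Int) < (seq.length : Int) ∧ (e : Int) < (seq.length : Int)
    · have hsn : s < seq.length := by exact_mod_cast hcond.1
      have hen : e < seq.length := by exact_mod_cast hcond.2
      have hmin1 : min (e + 1) seq.length = e + 1 := by omega
      rw [hmin1] at hacc
      rw [dif_pos hcond, PySem.List.pyRange_one_cons hcond.2]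
      have hcast1 : (e : Int) + 1 = ((e + 1 : Nat) : Int) := by push_cast; ring
      have hpgs : PySem.List.pyGetD (preL seq) (s : Int) 0 = pfx seq s :=
        preGet seq s (by omega)
      have htgt : PySem.List.pyGetD (preL seq) ((e : Int) + 1) 0 - k =
          pfx seq (e + 1) - k := by rw [hcast1, preGet seq (e + 1) (by omega)]
      by_cases h1 : acc < k
      · -- window sum below k: A extends e; B's inner while stops at once
        -- (prefix[s] > target) and records nothing
        rw [if_pos h1, hcast1]
        have hstep : ∀ acc' res',
            (res' = [] ∨ ∃ s0 e0 : Nat, res' = [(s0 : Int), (e0 : Int)] ∧ s0 ≤ s) →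
            acc' = pfx seq (min (e + 1 + 1) seq.length) - pfx seq s →
            loopA seq k (s : Int) ((e + 1 : Nat) : Int) acc' res' =
              colLoop (preL seq) k (seq.length : Int) (s : Int) res'
                (PySem.List.pyRange ((e : Int) + 1) (seq.length : Int)) := by
          intro acc' res' hres' hacc'
          rw [hcast1]
          exact ih (2 * seq.length - s - (e + 1)) (by omega) s (e + 1) acc' res'
            (by omega) (by omega) (by omega) hacc' hres'
        rw [colLoop]
        simp only [htgt]
        rw [advanceS_stop seq _ s (by rintro ⟨_, hlt⟩; omega)]
        rw [if_neg (show ¬ (s : Int) = (seq.length : Int) by exact_mod_cast (by omega : ¬ s = seq.length))]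
        rw [if_neg (show ¬ (PySem.List.pyGetD (preL seq) (s : Int) 0 = pfx seq (e + 1) - k ∧
            (res = [] ∨ (e : Int) - (s : Int) <
              (PySem.List.pyGet? res 1).getD 0 - (PySem.List.pyGet? res 0).getD 0)) from by
          rintro ⟨hpe, -⟩
          rw [hpgs] at hpe
          omega)]
        by_cases h2 : ((e + 1 : Nat) : Int) < (seq.length : Int)
        · have h2n : e + 1 < seq.length := by exact_mod_cast h2
          rw [if_pos h2, PySem.List.pyGetD_natCast, List.getD_eq_getElem seq 0 h2n]
          exact hstep _ res hres
            (by rw [show min (e + 1 + 1) seq.length = e + 1 + 1 by omega,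
              pfx_succ seq (e + 1) h2n]; omega)
        · rw [if_neg h2]
          have h2n : e + 1 = seq.length := by
            have := hcond.2; push_cast at h2 ⊢; omega
          exact hstep acc res hres
            (by rw [show min (e + 1 + 1) seq.length = e + 1 by omega]; omega)
      · by_cases h2 : acc = k
        · -- window sum equals k: A records [s, e] via updA; B's inner while stops
          -- at once with prefix[s] = target and records the same window
          rw [if_neg h1, if_pos h2, hcast1]
          have hstep : ∀ acc' res',
              (res' = [] ∨ ∃ s0 e0 : Nat, res' = [(s0 : Int), (e0 : Int)] ∧ s0 ≤ s) →
              acc' = pfx seq (min (e + 1 + 1) seq.length) - pfx seq s →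
              loopA seq k (s : Int) ((e + 1 : Nat) : Int) acc' res' =
                colLoop (preL seq) k (seq.length : Int) (s : Int) res'
                  (PySem.List.pyRange ((e : Int) + 1) (seq.length : Int)) := by
            intro acc' res' hres' hacc'
            rw [hcast1]
            exact ih (2 * seq.length - s - (e + 1)) (by omega) s (e + 1) acc' res'
              (by omega) (by omega) (by omega) hacc' hres'
          rw [colLoop]
          simp only [htgt]
          rw [advanceS_stop seq _ s (by rintro ⟨-, hlt⟩; omega)]
          rw [if_neg (show ¬ (s : Int) = (seq.length : Int) by exact_mod_cast (by omega : ¬ s = seq.length))]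
          rw [show (if PySem.List.pyGetD (preL seq) (s : Int) 0 = pfx seq (e + 1) - k ∧
                (res = [] ∨ (e : Int) - (s : Int) <
                  (PySem.List.pyGet? res 1).getD 0 - (PySem.List.pyGet? res 0).getD 0) then
                ([(s : Int), (e : Int)] : List Int)
              else res) = updA res (s : Int) (e : Int) from by
            rw [updA_eq_updB res s e hres]
            by_cases hx : res = [] ∨ (e : Int) - (s : Int) <
                (PySem.List.pyGet? res 1).getD 0 - (PySem.List.pyGet? res 0).getD 0
            · rw [if_pos (⟨by rw [hpgs]; omega, hx⟩ :
                PySem.List.pyGetD (preL seq) (s : Int) 0 = pfx seq (e + 1) - k ∧ _), if_pos hx]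
            · rw [if_neg (show ¬ (PySem.List.pyGetD (preL seq) (s : Int) 0 = pfx seq (e + 1) - k ∧
                  (res = [] ∨ (e : Int) - (s : Int) <
                    (PySem.List.pyGet? res 1).getD 0 - (PySem.List.pyGet? res 0).getD 0)) from by
                rintro ⟨-, h⟩; exact hx h), if_neg hx]]
          have hresU : updA res (s : Int) (e : Int) = [] ∨
              ∃ s0 e0 : Nat, updA res (s : Int) (e : Int) = [(s0 : Int), (e0 : Int)] ∧ s0 ≤ s := by
            rw [updA_eq_updB res s e hres]
            split_ifs
            · exact Or.inr ⟨s, e, rfl, le_rfl⟩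
            · exact hres
          by_cases h3 : ((e + 1 : Nat) : Int) < (seq.length : Int)
          · have h3n : e + 1 < seq.length := by exact_mod_cast h3
            rw [if_pos h3, PySem.List.pyGetD_natCast, List.getD_eq_getElem seq 0 h3n]
            exact hstep _ _ hresU
              (by rw [show min (e + 1 + 1) seq.length = e + 1 + 1 by omega,
                pfx_succ seq (e + 1) h3n]; omega)
          · rw [if_neg h3]
            exact hstep acc _ hresU
              (by rw [show min (e + 1 + 1) seq.length = e + 1 by omega]
                  have : e + 1 = seq.length := by
                    have := hcond.2; push_cast at h3 ⊢; omega
                  omega)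
        · -- window sum above k: A advances s by one; B's inner while takes the
          -- same first step
          have hgt : k < acc := lt_of_le_of_ne (not_lt.mp h1) (fun h => h2 h.symm)
          rw [if_neg h1, if_neg h2, if_pos hcond.1,
            PySem.List.pyGetD_natCast, List.getD_eq_getElem seq 0 hsn,
            show (s : Int) + 1 = ((s + 1 : Nat) : Int) by push_cast; ring]
          have hstep := ih (2 * seq.length - (s + 1) - e) (by omega) (s + 1) e
            (acc - seq[s]) res (by omega) (by omega) (by omega)
            (by rw [hmin1, pfx_succ seq s hsn]; omega)
            (by
              rcases hres with h | ⟨s0, e0, hb, hs0⟩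
              · exact Or.inl h
              · exact Or.inr ⟨s0, e0, hb, by omega⟩)
          rw [hstep, PySem.List.pyRange_one_cons hcond.2]
          simp only [colLoop, htgt]
          rw [show ((s + 1 : Nat) : Int) = (s : Int) + 1 by push_cast; ring,
            ← advanceS_shift seq (pfx seq (e + 1) - k) s hsn (by omega)]
    · rw [dif_neg hcond]
      by_cases hh : e = seq.length
      · rw [show PySem.List.pyRange (e : Int) (seq.length : Int) = [] from by
          rw [PySem.List.pyRange_one]; simp [hh], colLoop]
      · have hen : e < seq.length := by omega
        have hsn : s = seq.length := by
          by_contra hne2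
          exact hcond ⟨by exact_mod_cast (by omega : s < seq.length),
            by exact_mod_cast hen⟩
        rw [PySem.List.pyRange_one_cons (by exact_mod_cast hen), colLoop]
        simp only
        rw [advanceS_stop seq _ s (by rintro ⟨hlt, -⟩; omega)]
        rw [if_pos (by exact_mod_cast hsn)]

lemma solutionA_char (seq : List Int) (k : Int) (hne : seq ≠ []) :
    solution seq k = solution_alt seq k := by
  have hn : 0 < seq.length := List.length_pos_iff.mpr hne
  have hacc0 : ((PySem.List.pyGet? seq 0).getD 0) =
      pfx seq (min (0 + 1) seq.length) - pfx seq 0 := by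
    rw [PySem.List.pyGet?_zero, List.getElem?_eq_getElem hn]
    rw [show min (0 + 1) seq.length = 0 + 1 by omega, pfx_succ seq 0 hn]
    simp [pfx]
  have h := loopA_eq_col seq k (2 * seq.length) 0 0
    (pfx seq (min (0 + 1) seq.length) - pfx seq 0) [] (by omega) (by omega) (by omega)
    rfl (Or.inl rfl)
  rw [solution, hacc0, solution_alt]
  rw [show buildPrefix [0] seq = preL seq from by
    have := buildPrefix_eq seq 0 (by omega)
    simpa [pfx] using this]
  simpa using h

-- ===== VERDICT (by name: the statement is the Claim_ definition above) =====
theorem solution_spec : Claim_equal_solution := by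
  intro seq k _ hpre
  unfold Spec_solution
  exact solutionA_char seq k hpre
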